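-- pv_equiv track=rewrite | github.com/febrianrachmadi/BIA_ATLAS2 | deep_patchwork/pw/slurm_tools.py | get_jobid_string
-- ===== SOURCE A (Python) =====
-- def get_jobid_string(jobids):
--     job_str="";
--     count=1;
--     prev_id=-1;
--     for f in jobids:
--         current_id=int(f);
--         if count==1:
--             job_str+='{'+format(current_id)+'.'
--             prev_id=current_id;
--
--         if (current_id-prev_id)>1:
--             job_str+='.'+format(prev_id)+'} '+'{'+format(current_id)+'.'
--         if count==len(jobids):
--             job_str+='.'+format(current_id)+'}'
--
--         prev_id=current_id;
--         count=count+1;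
--     return job_str
-- ===== SOURCE B (Python) =====
-- def get_jobid_string(jobids):
--     ids = [int(f) for f in jobids]
--     if not ids:
--         return ""
--     runs = []
--     first = prev = ids[0]
--     for cur in ids[1:]:
--         if cur - prev > 1:
--             runs.append((first, prev))
--             first = cur
--         prev = cur
--     runs.append((first, prev))
--     return " ".join("{" + str(a) + ".." + str(b) + "}" for a, b in runs)
-- ===== Notes on version B (the rewrite author's own statement) =====
-- stated objective: simpler
-- what changed: A interleaves range-opening and range-closing string fragments inside one stateful loop with count/prev_id bookkeeping; B first partitions the ids into maximal runs (break when cur-prev>1), then formats each run as '{a..b}' and joins with spaces.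
import Mathlib
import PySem

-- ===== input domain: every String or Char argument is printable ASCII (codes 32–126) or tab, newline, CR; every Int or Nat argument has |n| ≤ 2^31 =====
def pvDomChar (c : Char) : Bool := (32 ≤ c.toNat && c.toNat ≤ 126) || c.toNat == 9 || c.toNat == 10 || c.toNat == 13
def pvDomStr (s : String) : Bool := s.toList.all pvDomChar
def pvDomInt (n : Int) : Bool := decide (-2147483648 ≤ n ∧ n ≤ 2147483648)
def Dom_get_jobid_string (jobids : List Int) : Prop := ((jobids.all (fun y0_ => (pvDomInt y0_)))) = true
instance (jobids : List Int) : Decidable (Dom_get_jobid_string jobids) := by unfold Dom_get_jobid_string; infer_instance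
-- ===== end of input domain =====

-- B partitions into maximal runs first and then formats/joins them, instead of A's
-- single loop that interleaves opening and closing fragments; same value, simpler shape.

-- ===== PORT A =====
-- one loop iteration of A: state (job_str, count, prev_id), n = len(jobids)
def pvStepA (n : Int) (st : String × Int × Int) (f : Int) : String × Int × Int :=
  let job_str := st.1
  let count := st.2.1
  let prev_id := st.2.2
  let current_id := f
  let job_str := if count = 1 then job_str ++ "{" ++ PySem.Int.toStr current_id ++ "." else job_str
  let prev_id := if count = 1 then current_id else prev_id
  let job_str := if current_id - prev_id > 1 then
      job_str ++ "." ++ PySem.Int.toStr prev_id ++ "} " ++ "{" ++ PySem.Int.toStr current_id ++ "."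
    else job_str
  let job_str := if count = n then job_str ++ "." ++ PySem.Int.toStr current_id ++ "}" else job_str
  (job_str, count + 1, current_id)

def get_jobid_string (jobids : List Int) : String :=
  (jobids.foldl (pvStepA (jobids.length : Int)) ("", 1, -1)).1

-- ===== PORT B =====
-- collect maximal runs (first, last); a new run starts when cur - prev > 1
def pvRunsAux (first prev : Int) : List Int → List (Int × Int)
  | [] => [(first, prev)]
  | x :: xs => if x - prev > 1 then (first, prev) :: pvRunsAux x x xs else pvRunsAux first x xs

def pvFmt (r : Int × Int) : String :=
  "{" ++ PySem.Int.toStr r.1 ++ ".." ++ PySem.Int.toStr r.2 ++ "}"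

-- ' '.join
def pvJoinSp : List String → String
  | [] => ""
  | [x] => x
  | x :: y :: xs => x ++ " " ++ pvJoinSp (y :: xs)

def get_jobid_string_alt : List Int → String
  | [] => ""
  | x :: xs => pvJoinSp ((pvRunsAux x x xs).map pvFmt)

-- ===== PRECONDITION & SPEC =====
def Spec_get_jobid_string (jobids : List Int) (out : String) : Prop := out = get_jobid_string_alt jobids
instance (jobids : List Int) (out : String) : Decidable (Spec_get_jobid_string jobids out) := by unfold Spec_get_jobid_string; infer_instance

-- ===== CLAIM (what is proved, stated in full; the proofs are below) =====
def Claim_equal_get_jobid_string : Prop := ∀ (jobids : List Int), Dom_get_jobid_string jobids → Spec_get_jobid_string jobids (get_jobid_string jobids)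

-- ===== LEMMAS AND PROOFS =====

theorem pv_brl (r : String) : ("} " : String) ++ ("{" ++ r) = "} {" ++ r := by
  rw [← String.append_assoc]; rfl

theorem pvRunsAux_ne (first prev : Int) (xs : List Int) : pvRunsAux first prev xs ≠ [] := by
  induction xs generalizing first prev with
  | nil => simp [pvRunsAux]
  | cons x xs ih =>
    simp only [pvRunsAux]
    split
    · simp
    · exact ih _ _

theorem pvJoinSp_cons (a : String) (l : List String) (h : l ≠ []) :
    pvJoinSp (a :: l) = a ++ " " ++ pvJoinSp l := by
  cases l with
  | nil => exact absurd rfl h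
  | cons b bs => rfl

-- loop invariant for A's tail: mid-loop the string is the closed runs so far plus an
-- open '{first.' fragment, and the count of the next element is n - |xs| + 1 > 1
theorem pv_loop (n : Nat) :
    ∀ (xs : List Int), xs ≠ [] → xs.length < n →
    ∀ (p : String) (first prev : Int),
      (List.foldl (pvStepA (n : Int))
        (p ++ "{" ++ PySem.Int.toStr first ++ ".", (n : Int) - xs.length + 1, prev) xs).1
      = p ++ pvJoinSp ((pvRunsAux first prev xs).map pvFmt) := by
  intro xs
  induction xs with
  | nil => intro h; exact absurd rfl h
  | cons x xs ih =>
    intro _ hlen p first prev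
    cases xs with
    | nil =>
      -- last element of the list: count = n here
      have hc1 : ¬((n : Int) - (([x] : List Int).length : Int) + 1 = 1) := by
        simp at hlen ⊢; omega
      have hcn : ((n : Int) - (([x] : List Int).length : Int) + 1 = (n : Int)) := by
        simp
      rw [List.foldl_cons]
      simp only [pvStepA, if_neg hc1, if_pos hcn]
      by_cases hgap : x - prev > 1
      · rw [if_pos hgap]
        simp [pvRunsAux, if_pos hgap, pvFmt, pvJoinSp, String.append_assoc, pv_brl]
      · rw [if_neg hgap]
        simp [pvRunsAux, if_neg hgap, pvFmt, pvJoinSp, String.append_assoc]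
    | cons y ys =>
      -- middle element: count ≠ 1 and count ≠ n
      have hc1 : ¬((n : Int) - ((x :: y :: ys : List Int).length : Int) + 1 = 1) := by
        simp at hlen ⊢; omega
      have hcn : ¬((n : Int) - ((x :: y :: ys : List Int).length : Int) + 1 = (n : Int)) := by
        simp at hlen ⊢; omega
      have hcount : ((n : Int) - ((x :: y :: ys : List Int).length : Int) + 1) + 1
          = (n : Int) - ((y :: ys : List Int).length : Int) + 1 := by
        simp; ring
      rw [List.foldl_cons]
      simp only [pvStepA, if_neg hc1, if_neg hcn]
      by_cases hgap : x - prev > 1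
      · rw [if_pos hgap, hcount,
          show p ++ "{" ++ PySem.Int.toStr first ++ "." ++ "." ++ PySem.Int.toStr prev
              ++ "} " ++ "{" ++ PySem.Int.toStr x ++ "."
            = (p ++ pvFmt (first, prev) ++ " ") ++ "{" ++ PySem.Int.toStr x ++ "." by
            simp [pvFmt, String.append_assoc],
          ih (by simp) (by simp at hlen ⊢; omega) (p ++ pvFmt (first, prev) ++ " ") x x]
        rw [show pvRunsAux first prev (x :: y :: ys)
            = (first, prev) :: pvRunsAux x x (y :: ys) by simp [pvRunsAux, if_pos hgap],
          List.map_cons,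
          pvJoinSp_cons _ _ (by simp [pvRunsAux_ne])]
        simp [String.append_assoc]
      · rw [if_neg hgap, hcount, ih (by simp) (by simp at hlen ⊢; omega) p first x,
          show pvRunsAux first prev (x :: y :: ys)
            = pvRunsAux first x (y :: ys) by simp [pvRunsAux, if_neg hgap]]

-- ===== VERDICT (by name: the statement is the Claim_ definition above) =====
theorem get_jobid_string_spec : Claim_equal_get_jobid_string := by
  intro jobids _
  unfold Spec_get_jobid_string
  cases jobids with
  | nil => rfl
  | cons x xs =>
    cases xs with
    | nil =>
      have hgap : ¬(x - x > 1) := by omega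
      simp only [get_jobid_string, List.foldl_cons, List.foldl_nil, pvStepA,
        ite_true, if_neg hgap]
      rw [if_pos (show (1 : Int) = (([x] : List Int).length : Int) by simp)]
      simp [get_jobid_string_alt, pvRunsAux, pvJoinSp, pvFmt, String.append_assoc]
    | cons y ys =>
      have hn1 : ¬((1 : Int) = ((x :: y :: ys : List Int).length : Int)) := by
        simp; omega
      have hgap : ¬(x - x > 1) := by omega
      have hcount : (1 : Int) + 1
          = ((x :: y :: ys : List Int).length : Int) - ((y :: ys : List Int).length : Int) + 1 := by
        simp
      show (List.foldl (pvStepA ((x :: y :: ys : List Int).length : Int)) ("", 1, -1)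
        (x :: y :: ys)).1 = _
      rw [List.foldl_cons]
      simp only [pvStepA, ite_true, if_neg hgap, if_neg hn1]
      rw [hcount, pv_loop (x :: y :: ys).length (y :: ys) (by simp) (by simp) "" x x]
      simp [get_jobid_string_alt]
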